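-- pv_equiv track=rewrite | github.com/Farhan-J-Vhora/Social_Media_Automation_Tool | services/linkedin.py | determine_post_type
-- ===== SOURCE A (Python) =====
-- def determine_post_type(media_data):
--     image_count = sum(1 for item in media_data if item["media_type"] == "image")
--     video_count = sum(1 for item in media_data if item["media_type"] == "video")
--
--     if image_count > 0 and video_count > 0:
--         return "mixed_media"
--     elif video_count > 1:
--         return "multiple_videos"
--     elif video_count == 1:
--         return "single_video"
--     elif image_count > 1:
--         return "multiple_images"
--     elif image_count == 1:
--         return "single_image"
--     else:
--         return "text_only"
-- ===== SOURCE B (Python) =====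
-- # Six-state finite state machine: fold each item's media_type through transition
-- # tables, with early exit on the absorbing mixed_media state. No counts are kept.
-- _ON_IMAGE = {
--     "text_only": "single_image",
--     "single_image": "multiple_images",
--     "multiple_images": "multiple_images",
--     "single_video": "mixed_media",
--     "multiple_videos": "mixed_media",
--     "mixed_media": "mixed_media",
-- }
-- _ON_VIDEO = {
--     "text_only": "single_video",
--     "single_video": "multiple_videos",
--     "multiple_videos": "multiple_videos",
--     "single_image": "mixed_media",
--     "multiple_images": "mixed_media",
--     "mixed_media": "mixed_media",
-- }
--
--
-- def determine_post_type(media_data):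
--     state = "text_only"
--     for item in media_data:
--         t = item["media_type"]
--         if t == "image":
--             state = _ON_IMAGE[state]
--         elif t == "video":
--             state = _ON_VIDEO[state]
--         if state == "mixed_media":
--             break
--     return state
-- ===== Notes on version B (the rewrite author's own statement) =====
-- stated objective: alternative
-- what changed: A counts images and videos in two filtered passes and then classifies with an if/elif cascade; B keeps no counts at all: it runs a six-state finite state machine (the state IS the answer string) once over the items via transition tables, exiting early at the absorbing mixed_media state.
import Mathlib
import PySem

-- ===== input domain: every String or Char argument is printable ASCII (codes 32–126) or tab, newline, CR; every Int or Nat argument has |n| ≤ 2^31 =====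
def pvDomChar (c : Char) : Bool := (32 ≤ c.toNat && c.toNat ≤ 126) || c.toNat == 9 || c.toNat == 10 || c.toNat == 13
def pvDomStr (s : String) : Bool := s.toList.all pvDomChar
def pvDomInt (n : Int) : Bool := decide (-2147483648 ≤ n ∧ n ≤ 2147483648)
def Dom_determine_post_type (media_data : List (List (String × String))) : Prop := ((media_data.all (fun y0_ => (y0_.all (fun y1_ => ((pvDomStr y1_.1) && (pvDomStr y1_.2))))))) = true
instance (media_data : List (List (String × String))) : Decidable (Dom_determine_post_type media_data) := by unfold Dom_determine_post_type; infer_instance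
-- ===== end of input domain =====

-- B replaces A's two filtered counting passes + if/elif cascade by a six-state finite
-- state machine folded once over the items (alternative; return value only).

-- ===== PORT A =====
def determine_post_type (media_data : List (List (String × String))) : String :=
  let image_count : Int := media_data.foldl
    (fun acc item => if PySem.Dict.getD (PySem.Dict.mk item) "media_type" "" == "image" then acc + 1 else acc) 0
  let video_count : Int := media_data.foldl
    (fun acc item => if PySem.Dict.getD (PySem.Dict.mk item) "media_type" "" == "video" then acc + 1 else acc) 0
  if image_count > 0 && video_count > 0 then "mixed_media"
  else if video_count > 1 then "multiple_videos"
  else if video_count == 1 then "single_video"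
  else if image_count > 1 then "multiple_images"
  else if image_count == 1 then "single_image"
  else "text_only"

-- ===== PORT B =====
def pvOnImage : PySem.Dict String String := PySem.Dict.ofList
  [("text_only", "single_image"), ("single_image", "multiple_images"),
   ("multiple_images", "multiple_images"), ("single_video", "mixed_media"),
   ("multiple_videos", "mixed_media"), ("mixed_media", "mixed_media")]

def pvOnVideo : PySem.Dict String String := PySem.Dict.ofList
  [("text_only", "single_video"), ("single_video", "multiple_videos"),
   ("multiple_videos", "multiple_videos"), ("single_image", "mixed_media"),
   ("multiple_images", "mixed_media"), ("mixed_media", "mixed_media")]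

-- the for-loop with its early 'break' on the absorbing state, as structural recursion
def pvLoop : List (List (String × String)) → String → String
  | [], state => state
  | item :: rest, state =>
    let t := PySem.Dict.getD (PySem.Dict.mk item) "media_type" ""
    let state' := if t == "image" then pvOnImage.getD state ""
                  else if t == "video" then pvOnVideo.getD state "" else state
    if state' == "mixed_media" then state' else pvLoop rest state'

def determine_post_type_alt (media_data : List (List (String × String))) : String :=
  pvLoop media_data "text_only"

-- ===== PRECONDITION & SPEC =====
-- Pre_ excludes inputs where some item lacks the "media_type" key: there both Pythons raise KeyError.
def Pre_determine_post_type (media_data : List (List (String × String))) : Prop :=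
  ∀ item ∈ media_data, (PySem.Dict.mk item).contains "media_type" = true
instance (media_data : List (List (String × String))) : Decidable (Pre_determine_post_type media_data) := by
  unfold Pre_determine_post_type; infer_instance
def pvWitness_determine_post_type : (List (List (String × String))) :=
  [[("media_type", "image")], [("media_type", "video")]]
def Spec_determine_post_type (media_data : List (List (String × String))) (out : String) : Prop := out = determine_post_type_alt media_data
instance (media_data : List (List (String × String))) (out : String) : Decidable (Spec_determine_post_type media_data out) := by unfold Spec_determine_post_type; infer_instance

-- ===== CLAIM (what is proved, stated in full; the proofs are below) =====
def Claim_equal_determine_post_type : Prop := ∀ (media_data : List (List (String × String))), Dom_determine_post_type media_data → Pre_determine_post_type media_data → Spec_determine_post_type media_data (determine_post_type media_data)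

-- ===== LEMMAS AND PROOFS =====
-- the classification as a function of the two (unclamped) counts
def pvEnc (m n : Nat) : String :=
  if 0 < m ∧ 0 < n then "mixed_media"
  else if 1 < n then "multiple_videos"
  else if n = 1 then "single_video"
  else if 1 < m then "multiple_images"
  else if m = 1 then "single_image"
  else "text_only"

theorem pv_count_fold (l : List (List (String × String))) (v : String) (a : Int) :
    l.foldl (fun acc item => if PySem.Dict.getD (PySem.Dict.mk item) "media_type" "" == v then acc + 1 else acc) a
      = a + ((l.map (fun item => PySem.Dict.getD (PySem.Dict.mk item) "media_type" "")).count v : Int) := by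
  induction l generalizing a with
  | nil => simp
  | cons x xs ih =>
    simp only [List.foldl_cons, ih, List.map_cons, List.count_cons]
    by_cases h : PySem.Dict.getD (PySem.Dict.mk x) "media_type" "" = v
    · simp [h]; ring
    · simp [h]

theorem pv_cascade_eq_enc (m n : Nat) :
    (if ((m : Int) > 0 && (n : Int) > 0) then "mixed_media"
     else if (n : Int) > 1 then "multiple_videos"
     else if ((n : Int) == 1) then "single_video"
     else if (m : Int) > 1 then "multiple_images"
     else if ((m : Int) == 1) then "single_image"
     else "text_only")
    = pvEnc m n := by
  unfold pvEnc
  simp only [gt_iff_lt, Bool.and_eq_true, decide_eq_true_eq, beq_iff_eq]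
  split_ifs <;> first | rfl | omega

theorem pvEnc_clamp (m n : Nat) : pvEnc m n = pvEnc (min m 2) (min n 2) := by
  unfold pvEnc; split_ifs <;> first | rfl | omega

theorem pv_step_image (m n : Nat) : pvOnImage.getD (pvEnc m n) "" = pvEnc (m + 1) n := by
  rw [pvEnc_clamp m n, pvEnc_clamp (m + 1) n]
  have hm : min m 2 = 0 ∧ min (m + 1) 2 = 1 ∨ min m 2 = 1 ∧ min (m + 1) 2 = 2 ∨
      min m 2 = 2 ∧ min (m + 1) 2 = 2 := by omega
  have hn : min n 2 = 0 ∨ min n 2 = 1 ∨ min n 2 = 2 := by omega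
  rcases hm with ⟨h1, h2⟩ | ⟨h1, h2⟩ | ⟨h1, h2⟩ <;> rcases hn with h3 | h3 | h3 <;>
    rw [h1, h2, h3] <;> decide

theorem pv_step_video (m n : Nat) : pvOnVideo.getD (pvEnc m n) "" = pvEnc m (n + 1) := by
  rw [pvEnc_clamp m n, pvEnc_clamp m (n + 1)]
  have hn : min n 2 = 0 ∧ min (n + 1) 2 = 1 ∨ min n 2 = 1 ∧ min (n + 1) 2 = 2 ∨
      min n 2 = 2 ∧ min (n + 1) 2 = 2 := by omega
  have hm : min m 2 = 0 ∨ min m 2 = 1 ∨ min m 2 = 2 := by omega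
  rcases hn with ⟨h1, h2⟩ | ⟨h1, h2⟩ | ⟨h1, h2⟩ <;> rcases hm with h3 | h3 | h3 <;>
    rw [h3, h1, h2] <;> decide

theorem pvEnc_mixed_iff (m n : Nat) : pvEnc m n = "mixed_media" ↔ 0 < m ∧ 0 < n := by
  unfold pvEnc; split_ifs with h <;> simp_all

-- loop invariant: running the machine from state pvEnc m n adds the suffix's counts
theorem pvLoop_enc (l : List (List (String × String))) (m n : Nat) :
    pvLoop l (pvEnc m n)
      = pvEnc (m + (l.map (fun item => PySem.Dict.getD (PySem.Dict.mk item) "media_type" "")).count "image")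
              (n + (l.map (fun item => PySem.Dict.getD (PySem.Dict.mk item) "media_type" "")).count "video") := by
  induction l generalizing m n with
  | nil => simp [pvLoop]
  | cons x xs ih =>
    simp only [pvLoop, List.map_cons, List.count_cons]
    set t := PySem.Dict.getD (PySem.Dict.mk x) "media_type" "" with ht
    by_cases hi : t = "image"
    · rw [show (if t == "image" then pvOnImage.getD (pvEnc m n) ""
            else if t == "video" then pvOnVideo.getD (pvEnc m n) "" else pvEnc m n)
          = pvEnc (m + 1) n by simp [hi, pv_step_image]]
      by_cases hmix : pvEnc (m + 1) n = "mixed_media"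
      · rw [if_pos (by simp [hmix]), hmix]
        have h2 := (pvEnc_mixed_iff (m + 1) n).1 hmix
        symm; rw [pvEnc_mixed_iff]
        simp [hi]
        omega
      · rw [if_neg (by simp [hmix]), ih]
        simp [hi]
        congr 1
        omega
    · by_cases hv : t = "video"
      · rw [show (if t == "image" then pvOnImage.getD (pvEnc m n) ""
              else if t == "video" then pvOnVideo.getD (pvEnc m n) "" else pvEnc m n)
            = pvEnc m (n + 1) by simp [hv, pv_step_video]]
        by_cases hmix : pvEnc m (n + 1) = "mixed_media"
        · rw [if_pos (by simp [hmix]), hmix]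
          have h2 := (pvEnc_mixed_iff m (n + 1)).1 hmix
          symm; rw [pvEnc_mixed_iff]
          simp [hv]
          omega
        · rw [if_neg (by simp [hmix]), ih]
          simp [hv]
          congr 1
          omega
      · rw [show (if t == "image" then pvOnImage.getD (pvEnc m n) ""
              else if t == "video" then pvOnVideo.getD (pvEnc m n) "" else pvEnc m n)
            = pvEnc m n by simp [hi, hv]]
        by_cases hmix : pvEnc m n = "mixed_media"
        · rw [if_pos (by simp [hmix]), hmix]
          have h2 := (pvEnc_mixed_iff m n).1 hmix
          symm; rw [pvEnc_mixed_iff]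
          simp [hi, hv]
          omega
        · rw [if_neg (by simp [hmix]), ih]
          simp [hi, hv]

-- ===== VERDICT (by name: the statement is the Claim_ definition above) =====
theorem determine_post_type_spec : Claim_equal_determine_post_type := by
  intro md _ _
  show determine_post_type md = determine_post_type_alt md
  unfold determine_post_type determine_post_type_alt
  simp only [pv_count_fold, zero_add]
  rw [pv_cascade_eq_enc]
  have h0 : ("text_only" : String) = pvEnc 0 0 := by decide
  rw [h0, pvLoop_enc]
  simp
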